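-- pv_equiv track=rewrite | github.com/thiviyanT/IntelliGraphs | intelligraphs/data_loaders/loading_functions.py | split_subgraphs
-- ===== SOURCE A (Python) =====
-- def split_subgraphs(lists):
--     """
--     Split a list of lists into subgraphs based on empty lists as separators.
--
--     :param lists: List of lists, where each inner list contains strings. Empty lists are used as separators.
--     :return: A list of subgraphs, where each subgraph is a list of lists of strings.
--     """
--     subgraphs = []
--     current_subgraph = []
--
--     for inner_list in lists:
--         if inner_list != ['']:
--             current_subgraph.append(inner_list)
--         else:
--             subgraphs.append(current_subgraph)
--             current_subgraph = []
--
--     return subgraphs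
-- ===== SOURCE B (Python) =====
-- def split_subgraphs(lists):
--     # B: collect separator indices first, then slice between boundaries.
--     separator_positions = [i for i, inner in enumerate(lists) if inner == ['']]
--     subgraphs = []
--     start = 0
--     for i in separator_positions:
--         subgraphs.append(lists[start:i])
--         start = i + 1
--     return subgraphs
-- ===== Notes on version B (the rewrite author's own statement) =====
-- stated objective: alternative
-- what changed: B first computes the list of separator indices and then slices the input between consecutive boundaries, instead of A's single pass that grows a current-subgraph accumulator element by element.
import Mathlib
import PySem

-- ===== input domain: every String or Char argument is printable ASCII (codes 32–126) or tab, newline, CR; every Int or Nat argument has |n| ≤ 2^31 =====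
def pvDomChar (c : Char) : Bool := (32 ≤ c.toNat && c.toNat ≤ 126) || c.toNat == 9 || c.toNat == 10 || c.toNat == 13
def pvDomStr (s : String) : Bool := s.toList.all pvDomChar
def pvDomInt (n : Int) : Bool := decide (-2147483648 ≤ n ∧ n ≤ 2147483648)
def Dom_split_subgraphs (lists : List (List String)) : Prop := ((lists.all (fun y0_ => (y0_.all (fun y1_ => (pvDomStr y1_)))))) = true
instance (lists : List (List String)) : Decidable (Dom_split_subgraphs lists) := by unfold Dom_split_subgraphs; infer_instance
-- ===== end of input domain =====

-- B collects the separator indices first and then slices the input between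
-- consecutive boundaries; A makes one pass growing a current-subgraph accumulator.
-- Same return value; neither mutates its argument observably.

-- ===== PORT A =====
def split_subgraphs (lists : List (List String)) : List (List (List String)) :=
  (lists.foldl
    (fun (st : List (List (List String)) × List (List String)) inner =>
      if inner ≠ [""] then (st.1, st.2 ++ [inner]) else (st.1 ++ [st.2], []))
    ([], [])).1

-- ===== PORT B =====
def split_subgraphs_alt (lists : List (List String)) : List (List (List String)) :=
  let separator_positions :=
    ((PySem.List.enumerate lists).filter (fun p => p.2 == [""])).map (·.1)
  (separator_positions.foldl
    (fun (st : List (List (List String)) × Int) i =>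
      (st.1 ++ [PySem.List.slice lists (some st.2) (some i)], i + 1))
    ([], 0)).1

-- ===== PRECONDITION & SPEC =====
def Spec_split_subgraphs (lists : List (List String)) (out : List (List (List String))) : Prop := out = split_subgraphs_alt lists
instance (lists : List (List String)) (out : List (List (List String))) : Decidable (Spec_split_subgraphs lists out) := by unfold Spec_split_subgraphs; infer_instance

-- ===== CLAIM (what is proved, stated in full; the proofs are below) =====
def Claim_equal_split_subgraphs : Prop := ∀ (lists : List (List String)), Dom_split_subgraphs lists → Spec_split_subgraphs lists (split_subgraphs lists)

-- ===== LEMMAS AND PROOFS =====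

-- The result of A's loop, as a structural recursion on the input with the
-- current (not yet emitted) subgraph as accumulator.
def goA : List (List String) → List (List String) → List (List (List String))
  | [], _ => []
  | x :: xs, cur => if x ≠ [""] then goA xs (cur ++ [x]) else cur :: goA xs []

theorem foldA_eq (l : List (List String)) (acc : List (List (List String)))
    (cur : List (List String)) :
    (l.foldl
      (fun (st : List (List (List String)) × List (List String)) inner =>
        if inner ≠ [""] then (st.1, st.2 ++ [inner]) else (st.1 ++ [st.2], []))
      (acc, cur)).1 = acc ++ goA l cur := by
  induction l generalizing acc cur with
  | nil => simp [goA]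
  | cons x xs ih =>
    rw [List.foldl_cons]
    by_cases hx : x = [""]
    · rw [if_neg (by simp [hx]), ih]
      simp [goA, hx]
    · rw [if_pos (by simp [hx]), ih]
      simp [goA, hx]

theorem foldB_eq (l full : List (List String)) (acc : List (List (List String)))
    (s k : Int) (hs : 0 ≤ s) (hsk : s ≤ k) (hdrop : full.drop k.toNat = l) :
    ((((PySem.List.enumerate l k).filter (fun p => p.2 == [""])).map (·.1)).foldl
      (fun (st : List (List (List String)) × Int) i =>
        (st.1 ++ [PySem.List.slice full (some st.2) (some i)], i + 1))
      (acc, s)).1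
    = acc ++ goA l ((full.drop s.toNat).take (k.toNat - s.toNat)) := by
  induction l generalizing acc s k with
  | nil => simp [PySem.List.enumerate_nil, goA]
  | cons x xs ih =>
    have hk : (0:Int) ≤ k := le_trans hs hsk
    have hdropS : (full.drop k.toNat) = x :: xs := hdrop
    have hdrop' : full.drop (k + 1).toNat = xs := by
      have : (k + 1).toNat = k.toNat + 1 := by omega
      rw [this, ← List.drop_drop, hdropS]
      simp
    by_cases hx : x = [""]
    · subst hx
      rw [PySem.List.enumerate_cons]
      simp only [List.filter_cons, List.map_cons, beq_self_eq_true, if_pos]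
      rw [List.foldl_cons]
      have hstep : PySem.List.slice full (some s) (some k)
          = (full.drop s.toNat).take (k.toNat - s.toNat) :=
        PySem.List.slice_toNat full hs hk
      rw [ih _ (k + 1) (k + 1) (by omega) (le_refl _) hdrop']
      simp [goA, hstep]
    · rw [PySem.List.enumerate_cons]
      have hne : ¬ ((k, x).2 == ([""] : List String)) = true := by
        simpa using hx
      simp only [List.filter_cons, hne, if_neg, Bool.false_eq_true, not_false_iff]
      rw [ih _ s (k + 1) hs (by omega) hdrop']
      have hcur : (full.drop s.toNat).take ((k + 1).toNat - s.toNat)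
          = (full.drop s.toNat).take (k.toNat - s.toNat) ++ [x] := by
        have h1 : (k + 1).toNat - s.toNat = (k.toNat - s.toNat) + 1 := by omega
        rw [h1, List.take_add]
        have h2 : (full.drop s.toNat).drop (k.toNat - s.toNat) = x :: xs := by
          rw [List.drop_drop]
          have : s.toNat + (k.toNat - s.toNat) = k.toNat := by omega
          rw [this, hdropS]
        rw [h2]
        simp
      rw [hcur]
      simp [goA, hx]

-- ===== VERDICT (by name: the statement is the Claim_ definition above) =====
theorem split_subgraphs_spec : Claim_equal_split_subgraphs := by
  intro lists _
  unfold Spec_split_subgraphs split_subgraphs split_subgraphs_alt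
  rw [foldA_eq, foldB_eq lists lists [] 0 0 (le_refl _) (le_refl _) (by simp)]
  simp
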